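-- pv_equiv track=rewrite | github.com/michaeljoyce217/LEARNVIA | _system/REALISTIC_WORKFLOW/scripts/run_pass1_only.py | extract_competencies
-- ===== SOURCE A (Python) =====
-- def extract_competencies(consensus_issues: list) -> dict:
--     """Extract competency breakdown from consensus issues"""
--     competency_map = {
--         # Authoring competencies
--         "structural_integrity": "Structural Integrity",
--         "pedagogical_flow": "Pedagogical Flow",
--         "conceptual_clarity": "Conceptual Clarity",
--         "assessment_quality": "Assessment Quality",
--         "student_engagement": "Student Engagement",
--         # Style competencies
--         "mechanical_compliance": "Mechanical Compliance",
--         "mathematical_formatting": "Mathematical Formatting",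
--         "punctuation_grammar": "Punctuation & Grammar",
--         "accessibility": "Accessibility",
--         "consistency": "Consistency"
--     }
--
--     competency_breakdown = {comp: 0 for comp in competency_map.values()}
--
--     for issue in consensus_issues:
--         # Determine competency based on issue content
--         issue_text = issue.get('issue', '').lower()
--
--         # Map issues to competencies
--         if any(word in issue_text for word in ['structure', 'organization', 'header', 'section']):
--             competency_breakdown["Structural Integrity"] += 1
--         elif any(word in issue_text for word in ['flow', 'sequence', 'prerequisite', 'scaffold', 'objective']):
--             competency_breakdown["Pedagogical Flow"] += 1
--         elif any(word in issue_text for word in ['clarity', 'explanation', 'concept', 'understand', 'definition']):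
--             competency_breakdown["Conceptual Clarity"] += 1
--         elif any(word in issue_text for word in ['assessment', 'question', 'exercise', 'practice']):
--             competency_breakdown["Assessment Quality"] += 1
--         elif any(word in issue_text for word in ['engagement', 'motivation', 'interest', 'relevance', 'real-world']):
--             competency_breakdown["Student Engagement"] += 1
--         elif any(word in issue_text for word in ['format', 'notation', 'mathematical', 'equation', 'tags']):
--             competency_breakdown["Mathematical Formatting"] += 1
--         elif any(word in issue_text for word in ['punctuation', 'grammar', 'spelling', 'sentence']):
--             competency_breakdown["Punctuation & Grammar"] += 1
--         elif any(word in issue_text for word in ['accessibility', 'alt', 'screen reader']):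
--             competency_breakdown["Accessibility"] += 1
--         elif any(word in issue_text for word in ['consistency', 'uniform', 'standardize', 'spacing']):
--             competency_breakdown["Consistency"] += 1
--         else:
--             competency_breakdown["Mechanical Compliance"] += 1
--
--     return competency_breakdown
-- ===== SOURCE B (Python) =====
-- RULES = [
--     ("Structural Integrity", ['structure', 'organization', 'header', 'section']),
--     ("Pedagogical Flow", ['flow', 'sequence', 'prerequisite', 'scaffold', 'objective']),
--     ("Conceptual Clarity", ['clarity', 'explanation', 'concept', 'understand', 'definition']),
--     ("Assessment Quality", ['assessment', 'question', 'exercise', 'practice']),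
--     ("Student Engagement", ['engagement', 'motivation', 'interest', 'relevance', 'real-world']),
--     ("Mathematical Formatting", ['format', 'notation', 'mathematical', 'equation', 'tags']),
--     ("Punctuation & Grammar", ['punctuation', 'grammar', 'spelling', 'sentence']),
--     ("Accessibility", ['accessibility', 'alt', 'screen reader']),
--     ("Consistency", ['consistency', 'uniform', 'standardize', 'spacing']),
-- ]
--
-- ORDER = ["Structural Integrity", "Pedagogical Flow", "Conceptual Clarity",
--          "Assessment Quality", "Student Engagement", "Mechanical Compliance",
--          "Mathematical Formatting", "Punctuation & Grammar", "Accessibility",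
--          "Consistency"]
--
--
-- def _stage(rules, texts):
--     """Category-major recursive partition: peel off the texts matched by the
--     first rule, recurse on the rest; whatever survives all rules is
--     'Mechanical Compliance'."""
--     if not rules:
--         return {"Mechanical Compliance": len(texts)}
--     (category, words), rest = rules[0], rules[1:]
--     hit = [t for t in texts if any(w in t for w in words)]
--     miss = [t for t in texts if not any(w in t for w in words)]
--     counts = _stage(rest, miss)
--     counts[category] = len(hit)
--     return counts
--
--
-- def extract_competencies(consensus_issues: list) -> dict:
--     """Extract competency breakdown from consensus issues"""
--     texts = [issue.get('issue', '').lower() for issue in consensus_issues]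
--     counts = _stage(RULES, texts)
--     return {c: counts[c] for c in ORDER}
-- ===== Notes on version B (the rewrite author's own statement) =====
-- stated objective: alternative
-- what changed: A walks the issues once (item-major), classifying each through an if/elif chain and incrementing a mutable counter dict; B is category-major: a recursive staged partition over the rule list, where each stage filters out and counts the texts matching its keywords and recurses on the unmatched remainder, texts surviving all stages being counted as 'Mechanical Compliance'.
import Mathlib
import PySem

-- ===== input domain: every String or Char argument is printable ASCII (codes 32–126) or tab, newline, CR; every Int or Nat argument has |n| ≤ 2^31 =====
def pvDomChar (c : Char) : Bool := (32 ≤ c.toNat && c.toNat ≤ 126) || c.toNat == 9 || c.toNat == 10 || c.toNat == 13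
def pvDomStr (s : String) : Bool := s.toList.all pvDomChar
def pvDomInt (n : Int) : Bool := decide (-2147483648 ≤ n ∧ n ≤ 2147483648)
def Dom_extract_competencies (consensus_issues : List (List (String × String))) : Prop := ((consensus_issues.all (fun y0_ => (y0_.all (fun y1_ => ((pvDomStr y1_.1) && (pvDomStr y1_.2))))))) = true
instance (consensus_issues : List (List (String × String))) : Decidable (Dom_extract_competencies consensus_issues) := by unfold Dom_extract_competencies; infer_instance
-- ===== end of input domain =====

-- B replaces A's item-major pass (if/elif chain + mutable counter dict) by a category-major
-- recursive staged partition over the rule list (alternative decomposition, same cost).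


-- ===== PORT A =====
-- loop body of A's 'for issue in consensus_issues' (the if/elif chain); Python's
-- 'competency_breakdown[k] += 1' is Dict.modify k 0 (· + 1): exact here since every
-- incremented key is present in the dict (initialised from competency_map.values()).
def pvStepA (d : PySem.Dict String Int) (issue : List (String × String)) : PySem.Dict String Int :=
  let issue_text := PySem.Str.lower ((PySem.Dict.mk issue).getD "issue" "")
  if (["structure", "organization", "header", "section"].any fun w => PySem.Str.isIn w issue_text) then
    d.modify "Structural Integrity" 0 (· + 1)
  else if (["flow", "sequence", "prerequisite", "scaffold", "objective"].any fun w => PySem.Str.isIn w issue_text) then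
    d.modify "Pedagogical Flow" 0 (· + 1)
  else if (["clarity", "explanation", "concept", "understand", "definition"].any fun w => PySem.Str.isIn w issue_text) then
    d.modify "Conceptual Clarity" 0 (· + 1)
  else if (["assessment", "question", "exercise", "practice"].any fun w => PySem.Str.isIn w issue_text) then
    d.modify "Assessment Quality" 0 (· + 1)
  else if (["engagement", "motivation", "interest", "relevance", "real-world"].any fun w => PySem.Str.isIn w issue_text) then
    d.modify "Student Engagement" 0 (· + 1)
  else if (["format", "notation", "mathematical", "equation", "tags"].any fun w => PySem.Str.isIn w issue_text) then
    d.modify "Mathematical Formatting" 0 (· + 1)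
  else if (["punctuation", "grammar", "spelling", "sentence"].any fun w => PySem.Str.isIn w issue_text) then
    d.modify "Punctuation & Grammar" 0 (· + 1)
  else if (["accessibility", "alt", "screen reader"].any fun w => PySem.Str.isIn w issue_text) then
    d.modify "Accessibility" 0 (· + 1)
  else if (["consistency", "uniform", "standardize", "spacing"].any fun w => PySem.Str.isIn w issue_text) then
    d.modify "Consistency" 0 (· + 1)
  else
    d.modify "Mechanical Compliance" 0 (· + 1)

def extract_competencies (consensus_issues : List (List (String × String))) : List (String × Int) :=
  let competency_map : PySem.Dict String String := PySem.Dict.ofList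
    [("structural_integrity", "Structural Integrity"),
     ("pedagogical_flow", "Pedagogical Flow"),
     ("conceptual_clarity", "Conceptual Clarity"),
     ("assessment_quality", "Assessment Quality"),
     ("student_engagement", "Student Engagement"),
     ("mechanical_compliance", "Mechanical Compliance"),
     ("mathematical_formatting", "Mathematical Formatting"),
     ("punctuation_grammar", "Punctuation & Grammar"),
     ("accessibility", "Accessibility"),
     ("consistency", "Consistency")]
  let competency_breakdown : PySem.Dict String Int :=
    competency_map.values.foldl (fun d comp => d.insert comp 0) PySem.Dict.empty
  (consensus_issues.foldl pvStepA competency_breakdown).items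

-- ===== PORT B =====
def pvRules : List (String × List String) :=
  [("Structural Integrity", ["structure", "organization", "header", "section"]),
   ("Pedagogical Flow", ["flow", "sequence", "prerequisite", "scaffold", "objective"]),
   ("Conceptual Clarity", ["clarity", "explanation", "concept", "understand", "definition"]),
   ("Assessment Quality", ["assessment", "question", "exercise", "practice"]),
   ("Student Engagement", ["engagement", "motivation", "interest", "relevance", "real-world"]),
   ("Mathematical Formatting", ["format", "notation", "mathematical", "equation", "tags"]),
   ("Punctuation & Grammar", ["punctuation", "grammar", "spelling", "sentence"]),
   ("Accessibility", ["accessibility", "alt", "screen reader"]),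
   ("Consistency", ["consistency", "uniform", "standardize", "spacing"])]

def pvOrder : List String :=
  ["Structural Integrity", "Pedagogical Flow", "Conceptual Clarity",
   "Assessment Quality", "Student Engagement", "Mechanical Compliance",
   "Mathematical Formatting", "Punctuation & Grammar", "Accessibility",
   "Consistency"]

-- Source B's _stage: recursive staged partition over the rule list
def pvStage : List (String × List String) → List String → PySem.Dict String Int
  | [], texts => PySem.Dict.ofList [("Mechanical Compliance", (texts.length : Int))]
  | (category, words) :: rest, texts =>
      let hit := texts.filter (fun t => words.any (fun w => PySem.Str.isIn w t))
      let miss := texts.filter (fun t => !(words.any (fun w => PySem.Str.isIn w t)))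
      (pvStage rest miss).insert category (hit.length : Int)

-- Source B's final '{c: counts[c] for c in ORDER}'; counts[c] is total here since every
-- ORDER key is present in counts (getD is exact on present keys).
def extract_competencies_alt (consensus_issues : List (List (String × String))) : List (String × Int) :=
  let texts := consensus_issues.map
    (fun issue => PySem.Str.lower ((PySem.Dict.mk issue).getD "issue" ""))
  let counts := pvStage pvRules texts
  pvOrder.map (fun c => (c, counts.getD c 0))

-- ===== PRECONDITION & SPEC =====
def Spec_extract_competencies (consensus_issues : List (List (String × String))) (out : List (String × Int)) : Prop := out = extract_competencies_alt consensus_issues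
instance (consensus_issues : List (List (String × String))) (out : List (String × Int)) : Decidable (Spec_extract_competencies consensus_issues out) := by unfold Spec_extract_competencies; infer_instance

-- ===== CLAIM =====
def Claim_equal_extract_competencies : Prop := ∀ (consensus_issues : List (List (String × String))), Dom_extract_competencies consensus_issues → Spec_extract_competencies consensus_issues (extract_competencies consensus_issues)

-- ===== LEMMAS AND PROOFS =====

-- first-match classification relative to a rule list (the canonical form both sides reduce to)
def pvClassifyGo (rules : List (String × List String)) (text : String) : String :=
  match rules with
  | [] => "Mechanical Compliance"
  | (category, words) :: rest =>
      if words.any (fun w => PySem.Str.isIn w text) then category else pvClassifyGo rest text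

def pvCat (issue : List (String × String)) : String :=
  pvClassifyGo pvRules (PySem.Str.lower ((PySem.Dict.mk issue).getD "issue" ""))

def pvStep (d : PySem.Dict String Int) (c : String) : PySem.Dict String Int :=
  d.modify c 0 (· + 1)

-- ===== A-side lemmas =====

theorem pvStepA_eq_step (d : PySem.Dict String Int) (issue : List (String × String)) :
    pvStepA d issue = pvStep d (pvCat issue) := by
  simp only [pvStepA, pvStep, pvCat, pvRules, pvClassifyGo]
  split_ifs <;> rfl

theorem pvClassifyGo_mem (rules : List (String × List String)) (t : String) :
    pvClassifyGo rules t = "Mechanical Compliance" ∨ pvClassifyGo rules t ∈ rules.map Prod.fst := by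
  induction rules with
  | nil => left; rfl
  | cons r rest ih =>
      obtain ⟨cat, ws⟩ := r
      simp only [pvClassifyGo]
      split_ifs with h
      · right; simp
      · rcases ih with h' | h'
        · left; exact h'
        · right; simp [h']

theorem pvClassify_mem (t : String) : pvClassifyGo pvRules t ∈ pvOrder := by
  rcases pvClassifyGo_mem pvRules t with h | h
  · rw [h]; decide
  · revert h; simp only [pvRules, pvOrder, List.map_cons, List.map_nil, List.mem_cons,
      List.not_mem_nil, or_false]
    rintro (h | h | h | h | h | h | h | h | h) <;> simp [h]

-- one increment on the canonical 10-key dict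
theorem pvStep_canon (f : String → Int) (c0 : String) (hc : c0 ∈ pvOrder) :
    pvStep (PySem.Dict.mk (pvOrder.map fun c => (c, f c))) c0 =
      PySem.Dict.mk (pvOrder.map fun c => (c, if c = c0 then f c + 1 else f c)) := by
  simp only [pvOrder, List.mem_cons, List.not_mem_nil, or_false] at hc
  rcases hc with rfl | rfl | rfl | rfl | rfl | rfl | rfl | rfl | rfl | rfl <;> rfl

-- the counting invariant of A's per-issue fold
theorem pvFold_canon (issues : List (List (String × String))) :
    ∀ f : String → Int,
      (issues.foldl (fun d i => pvStep d (pvCat i))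
          (PySem.Dict.mk (pvOrder.map fun c => (c, f c)))).items =
        pvOrder.map fun c => (c, f c + ((issues.map pvCat).count c : Int)) := by
  induction issues with
  | nil => intro f; simp
  | cons i rest ih =>
      intro f
      have h0 : pvCat i ∈ pvOrder := pvClassify_mem _
      rw [List.foldl_cons, pvStep_canon f (pvCat i) h0,
        ih (fun c => if c = pvCat i then f c + 1 else f c)]
      refine List.map_congr_left fun c _ => ?_
      rcases eq_or_ne c (pvCat i) with rfl | h
      · simp [List.count_cons_self]
        ring
      · rw [if_neg h, List.map_cons, List.count_cons_of_ne (Ne.symm h)]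

theorem pvFold_zero (issues : List (List (String × String))) :
    (issues.foldl (fun d i => pvStep d (pvCat i))
        (PySem.Dict.mk (pvOrder.map fun c => (c, (0 : Int))))).items =
      pvOrder.map fun c => (c, ((issues.map pvCat).count c : Int)) := by
  simpa using pvFold_canon issues (fun _ => 0)

-- ===== B-side lemmas =====

-- splitting a classification count at the first rule
theorem pvCount_split (cat : String) (ws : List String) (rest : List (String × List String))
    (c : String) (ts : List String) :
    (ts.map (pvClassifyGo ((cat, ws) :: rest))).count c =
      (if c = cat then (ts.filter (fun t => ws.any (fun w => PySem.Str.isIn w t))).length else 0)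
      + ((ts.filter (fun t => !(ws.any (fun w => PySem.Str.isIn w t)))).map (pvClassifyGo rest)).count c := by
  induction ts with
  | nil => simp
  | cons t ts ih =>
      have hcl : pvClassifyGo ((cat, ws) :: rest) t =
          if (ws.any (fun w => PySem.Str.isIn w t)) then cat else pvClassifyGo rest t := rfl
      simp only [List.map_cons, List.filter_cons, hcl]
      by_cases hm : (ws.any (fun w => PySem.Str.isIn w t)) = true
      · rw [if_pos hm]
        simp only [hm, Bool.not_true, if_true, Bool.false_eq_true, if_false, List.length_cons]
        by_cases hc : c = cat
        · subst hc
          rw [List.count_cons_self, ih, if_pos rfl, if_pos rfl]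
          omega
        · rw [List.count_cons_of_ne (fun h => hc h.symm), ih, if_neg hc, if_neg hc]
      · rw [if_neg hm]
        simp only [Bool.not_eq_true] at hm
        simp only [hm, Bool.false_eq_true, if_false, Bool.not_false, if_true, List.map_cons]
        by_cases hc : c = pvClassifyGo rest t
        · subst hc
          rw [List.count_cons_self, List.count_cons_self, ih]; omega
        · rw [List.count_cons_of_ne (fun h => hc h.symm), List.count_cons_of_ne (fun h => hc h.symm), ih]

theorem pvCount_notin_zero (rules : List (String × List String)) (c : String)
    (hc1 : c ∉ rules.map Prod.fst) (hc2 : c ≠ "Mechanical Compliance") (l : List String) :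
    (l.map (pvClassifyGo rules)).count c = 0 := by
  rw [List.count_eq_zero]
  intro hmem
  obtain ⟨t, _, ht⟩ := List.mem_map.mp hmem
  rcases pvClassifyGo_mem rules t with h | h
  · exact hc2 (ht ▸ h)
  · exact hc1 (ht ▸ h)

-- the staged partition computes the classification counts
theorem pvStage_getD (rules : List (String × List String)) (ts : List String) (c : String)
    (hmc : "Mechanical Compliance" ∉ rules.map Prod.fst)
    (hnd : (rules.map Prod.fst).Nodup) :
    (pvStage rules ts).getD c 0 = ((ts.map (pvClassifyGo rules)).count c : Int) := by
  induction rules generalizing ts with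
  | nil =>
      by_cases hc : c = "Mechanical Compliance"
      · subst hc
        simp [pvStage, pvClassifyGo, PySem.Dict.ofList, PySem.Dict.update]
      · have h0 : List.count c (List.replicate ts.length "Mechanical Compliance") = 0 :=
          List.count_eq_zero.mpr (by simp; intro _; exact hc)
        simp [pvStage, pvClassifyGo, PySem.Dict.ofList, PySem.Dict.update,
          PySem.Dict.getD_insert, hc, h0]
  | cons r rest ih =>
      obtain ⟨cat, ws⟩ := r
      simp only [List.map_cons, List.mem_cons, not_or, List.nodup_cons] at hmc hnd
      simp only [pvStage]
      rw [PySem.Dict.getD_insert]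
      by_cases hc : c = cat
      · subst hc
        rw [if_pos rfl, pvCount_split]
        rw [pvCount_notin_zero rest c hnd.1 (fun h => hmc.1 h.symm)]
        simp
      · rw [if_neg hc, ih _ hmc.2 hnd.2, pvCount_split, if_neg hc]
        simp

-- ===== VERDICT =====
theorem extract_competencies_spec : Claim_equal_extract_competencies := by
  intro issues _
  unfold Spec_extract_competencies extract_competencies extract_competencies_alt
  dsimp only
  rw [show pvStepA = fun d i => pvStep d (pvCat i) from
    funext fun d => funext fun i => pvStepA_eq_step d i]
  have hA := pvFold_zero issues
  have hinit : ((PySem.Dict.ofList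
      [("structural_integrity", "Structural Integrity"),
       ("pedagogical_flow", "Pedagogical Flow"),
       ("conceptual_clarity", "Conceptual Clarity"),
       ("assessment_quality", "Assessment Quality"),
       ("student_engagement", "Student Engagement"),
       ("mechanical_compliance", "Mechanical Compliance"),
       ("mathematical_formatting", "Mathematical Formatting"),
       ("punctuation_grammar", "Punctuation & Grammar"),
       ("accessibility", "Accessibility"),
       ("consistency", "Consistency")]).values.foldl
        (fun d comp => d.insert comp 0) (PySem.Dict.empty : PySem.Dict String Int)) =
      PySem.Dict.mk (pvOrder.map fun c => (c, (0 : Int))) := by decide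
  rw [hinit, hA]
  refine List.map_congr_left fun c hc => ?_
  rw [pvStage_getD pvRules _ c (by decide) (by decide)]
  congr 1
  rw [List.map_map]
  rfl
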